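-- pv_equiv track=rewrite | github.com/DataSparkRI/Profiles | communityprofiles/census/tools/geography.py | get_geoid
-- ===== SOURCE A (Python) =====
-- from collections import OrderedDict
--
-- def get_geoid(line, source, sum_lev):
--     """ Return the geo id from files as Ordered Dict"""
--     geo_id = OrderedDict()
--     if sum_lev == "040":
--         levs = ['040']
--     elif sum_lev =="050":
--         levs = ['050', '040']
--     elif sum_lev == "060":
--         levs = ['060', '050', '040']
--     elif sum_lev == "140":
--         levs = ['140', '050', '040']
--     elif sum_lev == "150":
--         levs = ['150', '140', '050', '040']
--     else:
--         return None
--     levs.sort()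
--     # Do a backwards iteration of summary levels
--     if source == '2000':
--         for lev in levs:
--             geo_id[lev] = get_geo_id_uf1(line, lev)
--     elif source =='2010':
--         for lev in levs:
--             geo_id[lev] = get_geo_id_sf1(line, lev)
--     elif source =='acs2010':
--         for lev in levs:
--             geo_id[lev] = get_geo_id_acs2010(line, lev)
--     return geo_id
--
-- def get_geo_id_uf1(line, sum_lev):
--     """ Return the geo id for uf1 files"""
--     if sum_lev == "040":
--         return line[27:29]
--     elif sum_lev =="050":
--         return line[31:34]
--     elif sum_lev == "060":
--         return line[36:41]
--     elif sum_lev == "140":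
--                 # There should be a Geo Record in the Base Geographies for
--                 # everyone that exists in each data set.
--         return line[55:61]
--     elif sum_lev == "150":
--         return line[61:62]
--     else:
--         return None
--
-- def get_geo_id_sf1(line, sum_lev):
--     """ Return the geo id for uf1 files"""
--     if sum_lev == "040":
--         return line[27:29]
--     elif sum_lev =="050":
--         return line[29:32]
--     elif sum_lev == "060":
--         return line[36:41]
--     #elif sum_lev == "080":
--     #    return name_field
--                 # There should be a Geo Record in the Base Geographies for
--                 # everyone that exists in each data set.
--     elif sum_lev == "140":
--         return line[54:60]
--     elif sum_lev == "150":
--         return line[60:61]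
--     else:
--         return None
--
-- def get_geo_id_acs2010(line, sum_lev):
--     """ Return the geo id for uf1 files"""
--     if sum_lev == "040":
--         return line[25:27]
--     elif sum_lev =="050":
--         return line[27:30]
--     elif sum_lev == "060":
--         return line[30:35]
--     #elif sum_lev == "080":
--     #    return name_field
--     elif sum_lev == "140":
--         return line[40:46]
--     elif sum_lev == "150":
--         return line[46:47]
--     else:
--         return None
-- ===== SOURCE B (Python) =====
-- from collections import OrderedDict
--
-- # B re-thinks the task as data about the geography hierarchy and the record layouts:
-- # PARENT encodes the summary-level tree (each level's containing level); the levels of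
-- # a geoid are exactly sum_lev's ancestors-or-self.  FIELDS gives, per source file
-- # format, the record's geo fields in ascending-level order.  get_geoid scans the
-- # source's field layout once and keeps the fields that are ancestors-or-self of
-- # sum_lev, tested by walking PARENT upward -- no per-source dispatch, no sorting,
-- # no precomputed level lists.
--
-- PARENT = {"040": None, "050": "040", "060": "050", "140": "050", "150": "140"}
--
-- FIELDS = {
--     "2000":    [("040", 27, 29), ("050", 31, 34), ("060", 36, 41), ("140", 55, 61), ("150", 61, 62)],
--     "2010":    [("040", 27, 29), ("050", 29, 32), ("060", 36, 41), ("140", 54, 60), ("150", 60, 61)],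
--     "acs2010": [("040", 25, 27), ("050", 27, 30), ("060", 30, 35), ("140", 40, 46), ("150", 46, 47)],
-- }
--
-- def _is_component(lev, sum_lev):
--     """True iff lev is sum_lev or an ancestor of sum_lev in the level tree."""
--     cur = sum_lev
--     while cur is not None:
--         if cur == lev:
--             return True
--         cur = PARENT[cur]
--     return False
--
-- def get_geoid(line, source, sum_lev):
--     """ Return the geo id from files as Ordered Dict"""
--     if sum_lev not in PARENT:
--         return None
--     geo_id = OrderedDict()
--     for lev, a, b in FIELDS.get(source, ()):
--         if _is_component(lev, sum_lev):
--             geo_id[lev] = line[a:b]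
--     return geo_id
-- ===== Notes on version B (the rewrite author's own statement) =====
-- stated objective: alternative
-- what changed: Replaces the sum_lev if/elif chain, the in-place sort and the three per-source helper functions by a level-hierarchy tree (PARENT) walked upward to test ancestor-or-self membership, plus one scan over the source's field layout that keeps the matching fields.
import Mathlib
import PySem

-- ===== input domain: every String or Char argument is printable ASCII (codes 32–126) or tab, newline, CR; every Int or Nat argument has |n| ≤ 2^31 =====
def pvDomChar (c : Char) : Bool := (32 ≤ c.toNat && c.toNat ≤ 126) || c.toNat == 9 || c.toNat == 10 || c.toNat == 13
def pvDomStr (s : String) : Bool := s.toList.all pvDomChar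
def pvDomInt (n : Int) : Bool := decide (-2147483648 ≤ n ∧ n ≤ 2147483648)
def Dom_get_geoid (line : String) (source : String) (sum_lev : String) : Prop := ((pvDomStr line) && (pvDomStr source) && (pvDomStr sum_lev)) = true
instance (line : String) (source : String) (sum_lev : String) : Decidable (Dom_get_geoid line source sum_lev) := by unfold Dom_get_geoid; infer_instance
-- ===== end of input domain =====

-- B replaces the sum_lev if/elif chain, the sort and the three per-source helpers with a
-- level-hierarchy tree walked upward (ancestor-or-self test) and one scan over the
-- source's field layout (objective: alternative decomposition, same cost).

-- ===== PORT A =====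
-- A's helpers return str for every lev get_geoid passes them (Python None is unreachable
-- there); the impossible none is defaulted to "" to keep the dict's value type String.
def get_geo_id_uf1 (line : String) (sum_lev : String) : Option String :=
  if sum_lev == "040" then some (PySem.Str.slice line (some 27) (some 29))
  else if sum_lev == "050" then some (PySem.Str.slice line (some 31) (some 34))
  else if sum_lev == "060" then some (PySem.Str.slice line (some 36) (some 41))
  else if sum_lev == "140" then some (PySem.Str.slice line (some 55) (some 61))
  else if sum_lev == "150" then some (PySem.Str.slice line (some 61) (some 62))
  else none

def get_geo_id_sf1 (line : String) (sum_lev : String) : Option String :=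
  if sum_lev == "040" then some (PySem.Str.slice line (some 27) (some 29))
  else if sum_lev == "050" then some (PySem.Str.slice line (some 29) (some 32))
  else if sum_lev == "060" then some (PySem.Str.slice line (some 36) (some 41))
  else if sum_lev == "140" then some (PySem.Str.slice line (some 54) (some 60))
  else if sum_lev == "150" then some (PySem.Str.slice line (some 60) (some 61))
  else none

def get_geo_id_acs2010 (line : String) (sum_lev : String) : Option String :=
  if sum_lev == "040" then some (PySem.Str.slice line (some 25) (some 27))
  else if sum_lev == "050" then some (PySem.Str.slice line (some 27) (some 30))
  else if sum_lev == "060" then some (PySem.Str.slice line (some 30) (some 35))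
  else if sum_lev == "140" then some (PySem.Str.slice line (some 40) (some 46))
  else if sum_lev == "150" then some (PySem.Str.slice line (some 46) (some 47))
  else none

def get_geoid (line : String) (source : String) (sum_lev : String) : Option (List (String × String)) :=
  let geo_id : PySem.Dict String String := PySem.Dict.empty
  let levs? : Option (List String) :=
    if sum_lev == "040" then some ["040"]
    else if sum_lev == "050" then some ["050", "040"]
    else if sum_lev == "060" then some ["060", "050", "040"]
    else if sum_lev == "140" then some ["140", "050", "040"]
    else if sum_lev == "150" then some ["150", "140", "050", "040"]
    else none
  match levs? with
  | none => none
  | some levs =>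
    let levs := PySem.List.sorted levs (fun x => x) false
    let geo_id :=
      if source == "2000" then
        levs.foldl (fun d lev => d.insert lev ((get_geo_id_uf1 line lev).getD "")) geo_id
      else if source == "2010" then
        levs.foldl (fun d lev => d.insert lev ((get_geo_id_sf1 line lev).getD "")) geo_id
      else if source == "acs2010" then
        levs.foldl (fun d lev => d.insert lev ((get_geo_id_acs2010 line lev).getD "")) geo_id
      else geo_id
    some geo_id.items

-- ===== PORT B =====
-- the summary-level hierarchy: each level's containing (parent) level
def pvPARENT : PySem.Dict String (Option String) :=
  PySem.Dict.ofList
    [("040", none), ("050", some "040"), ("060", some "050"),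
     ("140", some "050"), ("150", some "140")]

-- per source file format: the record's geo fields in ascending-level order
def pvFIELDS : PySem.Dict String (List (String × Int × Int)) :=
  PySem.Dict.ofList
    [("2000",    [("040", 27, 29), ("050", 31, 34), ("060", 36, 41), ("140", 55, 61), ("150", 61, 62)]),
     ("2010",    [("040", 27, 29), ("050", 29, 32), ("060", 36, 41), ("140", 54, 60), ("150", 60, 61)]),
     ("acs2010", [("040", 25, 27), ("050", 27, 30), ("060", 30, 35), ("140", 40, 46), ("150", 46, 47)])]

-- Source B's while-loop walking PARENT upward; the fuel (5 ≥ tree depth) only makes the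
-- walk total, it is never exhausted on the keys of pvPARENT
def pvIsComponent : Nat → String → String → Bool
  | 0, _, _ => false
  | n + 1, lev, cur =>
    if cur == lev then true
    else
      match pvPARENT.get? cur with
      | some (some p) => pvIsComponent n lev p
      | _ => false

def get_geoid_alt (line : String) (source : String) (sum_lev : String) : Option (List (String × String)) :=
  if pvPARENT.contains sum_lev then
    some ((((pvFIELDS.get? source).getD []).foldl
      (fun d f =>
        if pvIsComponent 5 f.1 sum_lev then
          d.insert f.1 (PySem.Str.slice line (some f.2.1) (some f.2.2))
        else d)
      (PySem.Dict.empty : PySem.Dict String String)).items)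
  else none

-- ===== PRECONDITION & SPEC =====
def Spec_get_geoid (line : String) (source : String) (sum_lev : String) (out : Option (List (String × String))) : Prop := out = get_geoid_alt line source sum_lev
instance (line : String) (source : String) (sum_lev : String) (out : Option (List (String × String))) : Decidable (Spec_get_geoid line source sum_lev out) := by unfold Spec_get_geoid; infer_instance

-- ===== CLAIM (what is proved, stated in full; the proofs are below) =====
def Claim_equal_get_geoid : Prop := ∀ (line : String) (source : String) (sum_lev : String), Dom_get_geoid line source sum_lev → Spec_get_geoid line source sum_lev (get_geoid line source sum_lev)

-- ===== LEMMAS AND PROOFS =====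
theorem sort040 : PySem.List.sorted ["040"] (fun x => x) false = ["040"] := by
  apply PySem.List.sorted_eq_of_perm_of_pairwise_lt <;> (try decide) <;> simp
theorem sort050 : PySem.List.sorted ["050", "040"] (fun x => x) false = ["040", "050"] := by
  apply PySem.List.sorted_eq_of_perm_of_pairwise_lt <;> (try decide) <;> simp <;> decide
theorem sort060 : PySem.List.sorted ["060", "050", "040"] (fun x => x) false = ["040", "050", "060"] := by
  apply PySem.List.sorted_eq_of_perm_of_pairwise_lt <;> (try decide) <;> simp <;> decide
theorem sort140 : PySem.List.sorted ["140", "050", "040"] (fun x => x) false = ["040", "050", "140"] := by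
  apply PySem.List.sorted_eq_of_perm_of_pairwise_lt <;> (try decide) <;> simp <;> decide
theorem sort150 : PySem.List.sorted ["150", "140", "050", "040"] (fun x => x) false = ["040", "050", "140", "150"] := by
  apply PySem.List.sorted_eq_of_perm_of_pairwise_lt <;> (try decide) <;> simp <;> decide

-- ===== VERDICT (by name: the statement is the Claim_ definition above) =====
set_option maxHeartbeats 2000000 in
theorem get_geoid_spec : Claim_equal_get_geoid := by
  intro line source sum_lev _
  unfold Spec_get_geoid

  by_cases h040 : sum_lev = "040"
  · subst h040
    by_cases s1 : source = "2000"
    · subst s1; simp [get_geoid, get_geoid_alt, pvPARENT, pvFIELDS, pvIsComponent, get_geo_id_uf1, get_geo_id_sf1, get_geo_id_acs2010, PySem.Dict.get?, PySem.Dict.ofList, PySem.Dict.update, PySem.Dict.insert, PySem.Dict.contains, PySem.Dict.items, PySem.Dict.empty, sort040, sort050, sort060, sort140, sort150, List.find?, List.foldl, List.any, Option.getD]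
    · by_cases s2 : source = "2010"
      · subst s2; simp [get_geoid, get_geoid_alt, pvPARENT, pvFIELDS, pvIsComponent, get_geo_id_uf1, get_geo_id_sf1, get_geo_id_acs2010, PySem.Dict.get?, PySem.Dict.ofList, PySem.Dict.update, PySem.Dict.insert, PySem.Dict.contains, PySem.Dict.items, PySem.Dict.empty, sort040, sort050, sort060, sort140, sort150, List.find?, List.foldl, List.any, Option.getD]
      · by_cases s3 : source = "acs2010"
        · subst s3; simp [get_geoid, get_geoid_alt, pvPARENT, pvFIELDS, pvIsComponent, get_geo_id_uf1, get_geo_id_sf1, get_geo_id_acs2010, PySem.Dict.get?, PySem.Dict.ofList, PySem.Dict.update, PySem.Dict.insert, PySem.Dict.contains, PySem.Dict.items, PySem.Dict.empty, sort040, sort050, sort060, sort140, sort150, List.find?, List.foldl, List.any, Option.getD]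
        · simp [get_geoid, get_geoid_alt, pvPARENT, pvFIELDS, pvIsComponent, get_geo_id_uf1, get_geo_id_sf1, get_geo_id_acs2010, PySem.Dict.get?, PySem.Dict.ofList, PySem.Dict.update, PySem.Dict.insert, PySem.Dict.contains, PySem.Dict.items, PySem.Dict.empty, sort040, sort050, sort060, sort140, sort150, List.find?, List.foldl, List.any, Option.getD, show (("2000" == source) = false) from by simp [Ne.symm s1], show (("2010" == source) = false) from by simp [Ne.symm s2], show (("acs2010" == source) = false) from by simp [Ne.symm s3], show ((source == "2000") = false) from by simp [s1], show ((source == "2010") = false) from by simp [s2], show ((source == "acs2010") = false) from by simp [s3]]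
  ·
    by_cases h050 : sum_lev = "050"
    · subst h050
      by_cases s1 : source = "2000"
      · subst s1; simp [get_geoid, get_geoid_alt, pvPARENT, pvFIELDS, pvIsComponent, get_geo_id_uf1, get_geo_id_sf1, get_geo_id_acs2010, PySem.Dict.get?, PySem.Dict.ofList, PySem.Dict.update, PySem.Dict.insert, PySem.Dict.contains, PySem.Dict.items, PySem.Dict.empty, sort040, sort050, sort060, sort140, sort150, List.find?, List.foldl, List.any, Option.getD]
      · by_cases s2 : source = "2010"
        · subst s2; simp [get_geoid, get_geoid_alt, pvPARENT, pvFIELDS, pvIsComponent, get_geo_id_uf1, get_geo_id_sf1, get_geo_id_acs2010, PySem.Dict.get?, PySem.Dict.ofList, PySem.Dict.update, PySem.Dict.insert, PySem.Dict.contains, PySem.Dict.items, PySem.Dict.empty, sort040, sort050, sort060, sort140, sort150, List.find?, List.foldl, List.any, Option.getD]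
        · by_cases s3 : source = "acs2010"
          · subst s3; simp [get_geoid, get_geoid_alt, pvPARENT, pvFIELDS, pvIsComponent, get_geo_id_uf1, get_geo_id_sf1, get_geo_id_acs2010, PySem.Dict.get?, PySem.Dict.ofList, PySem.Dict.update, PySem.Dict.insert, PySem.Dict.contains, PySem.Dict.items, PySem.Dict.empty, sort040, sort050, sort060, sort140, sort150, List.find?, List.foldl, List.any, Option.getD]
          · simp [get_geoid, get_geoid_alt, pvPARENT, pvFIELDS, pvIsComponent, get_geo_id_uf1, get_geo_id_sf1, get_geo_id_acs2010, PySem.Dict.get?, PySem.Dict.ofList, PySem.Dict.update, PySem.Dict.insert, PySem.Dict.contains, PySem.Dict.items, PySem.Dict.empty, sort040, sort050, sort060, sort140, sort150, List.find?, List.foldl, List.any, Option.getD, show (("2000" == source) = false) from by simp [Ne.symm s1], show (("2010" == source) = false) from by simp [Ne.symm s2], show (("acs2010" == source) = false) from by simp [Ne.symm s3], show ((source == "2000") = false) from by simp [s1], show ((source == "2010") = false) from by simp [s2], show ((source == "acs2010") = false) from by simp [s3]]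
    ·
      by_cases h060 : sum_lev = "060"
      · subst h060
        by_cases s1 : source = "2000"
        · subst s1; simp [get_geoid, get_geoid_alt, pvPARENT, pvFIELDS, pvIsComponent, get_geo_id_uf1, get_geo_id_sf1, get_geo_id_acs2010, PySem.Dict.get?, PySem.Dict.ofList, PySem.Dict.update, PySem.Dict.insert, PySem.Dict.contains, PySem.Dict.items, PySem.Dict.empty, sort040, sort050, sort060, sort140, sort150, List.find?, List.foldl, List.any, Option.getD]
        · by_cases s2 : source = "2010"
          · subst s2; simp [get_geoid, get_geoid_alt, pvPARENT, pvFIELDS, pvIsComponent, get_geo_id_uf1, get_geo_id_sf1, get_geo_id_acs2010, PySem.Dict.get?, PySem.Dict.ofList, PySem.Dict.update, PySem.Dict.insert, PySem.Dict.contains, PySem.Dict.items, PySem.Dict.empty, sort040, sort050, sort060, sort140, sort150, List.find?, List.foldl, List.any, Option.getD]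
          · by_cases s3 : source = "acs2010"
            · subst s3; simp [get_geoid, get_geoid_alt, pvPARENT, pvFIELDS, pvIsComponent, get_geo_id_uf1, get_geo_id_sf1, get_geo_id_acs2010, PySem.Dict.get?, PySem.Dict.ofList, PySem.Dict.update, PySem.Dict.insert, PySem.Dict.contains, PySem.Dict.items, PySem.Dict.empty, sort040, sort050, sort060, sort140, sort150, List.find?, List.foldl, List.any, Option.getD]
            · simp [get_geoid, get_geoid_alt, pvPARENT, pvFIELDS, pvIsComponent, get_geo_id_uf1, get_geo_id_sf1, get_geo_id_acs2010, PySem.Dict.get?, PySem.Dict.ofList, PySem.Dict.update, PySem.Dict.insert, PySem.Dict.contains, PySem.Dict.items, PySem.Dict.empty, sort040, sort050, sort060, sort140, sort150, List.find?, List.foldl, List.any, Option.getD, show (("2000" == source) = false) from by simp [Ne.symm s1], show (("2010" == source) = false) from by simp [Ne.symm s2], show (("acs2010" == source) = false) from by simp [Ne.symm s3], show ((source == "2000") = false) from by simp [s1], show ((source == "2010") = false) from by simp [s2], show ((source == "acs2010") = false) from by simp [s3]]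
      ·
        by_cases h140 : sum_lev = "140"
        · subst h140
          by_cases s1 : source = "2000"
          · subst s1; simp [get_geoid, get_geoid_alt, pvPARENT, pvFIELDS, pvIsComponent, get_geo_id_uf1, get_geo_id_sf1, get_geo_id_acs2010, PySem.Dict.get?, PySem.Dict.ofList, PySem.Dict.update, PySem.Dict.insert, PySem.Dict.contains, PySem.Dict.items, PySem.Dict.empty, sort040, sort050, sort060, sort140, sort150, List.find?, List.foldl, List.any, Option.getD]
          · by_cases s2 : source = "2010"
            · subst s2; simp [get_geoid, get_geoid_alt, pvPARENT, pvFIELDS, pvIsComponent, get_geo_id_uf1, get_geo_id_sf1, get_geo_id_acs2010, PySem.Dict.get?, PySem.Dict.ofList, PySem.Dict.update, PySem.Dict.insert, PySem.Dict.contains, PySem.Dict.items, PySem.Dict.empty, sort040, sort050, sort060, sort140, sort150, List.find?, List.foldl, List.any, Option.getD]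
            · by_cases s3 : source = "acs2010"
              · subst s3; simp [get_geoid, get_geoid_alt, pvPARENT, pvFIELDS, pvIsComponent, get_geo_id_uf1, get_geo_id_sf1, get_geo_id_acs2010, PySem.Dict.get?, PySem.Dict.ofList, PySem.Dict.update, PySem.Dict.insert, PySem.Dict.contains, PySem.Dict.items, PySem.Dict.empty, sort040, sort050, sort060, sort140, sort150, List.find?, List.foldl, List.any, Option.getD]
              · simp [get_geoid, get_geoid_alt, pvPARENT, pvFIELDS, pvIsComponent, get_geo_id_uf1, get_geo_id_sf1, get_geo_id_acs2010, PySem.Dict.get?, PySem.Dict.ofList, PySem.Dict.update, PySem.Dict.insert, PySem.Dict.contains, PySem.Dict.items, PySem.Dict.empty, sort040, sort050, sort060, sort140, sort150, List.find?, List.foldl, List.any, Option.getD, show (("2000" == source) = false) from by simp [Ne.symm s1], show (("2010" == source) = false) from by simp [Ne.symm s2], show (("acs2010" == source) = false) from by simp [Ne.symm s3], show ((source == "2000") = false) from by simp [s1], show ((source == "2010") = false) from by simp [s2], show ((source == "acs2010") = false) from by simp [s3]]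
        ·
          by_cases h150 : sum_lev = "150"
          · subst h150
            by_cases s1 : source = "2000"
            · subst s1; simp [get_geoid, get_geoid_alt, pvPARENT, pvFIELDS, pvIsComponent, get_geo_id_uf1, get_geo_id_sf1, get_geo_id_acs2010, PySem.Dict.get?, PySem.Dict.ofList, PySem.Dict.update, PySem.Dict.insert, PySem.Dict.contains, PySem.Dict.items, PySem.Dict.empty, sort040, sort050, sort060, sort140, sort150, List.find?, List.foldl, List.any, Option.getD]
            · by_cases s2 : source = "2010"
              · subst s2; simp [get_geoid, get_geoid_alt, pvPARENT, pvFIELDS, pvIsComponent, get_geo_id_uf1, get_geo_id_sf1, get_geo_id_acs2010, PySem.Dict.get?, PySem.Dict.ofList, PySem.Dict.update, PySem.Dict.insert, PySem.Dict.contains, PySem.Dict.items, PySem.Dict.empty, sort040, sort050, sort060, sort140, sort150, List.find?, List.foldl, List.any, Option.getD]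
              · by_cases s3 : source = "acs2010"
                · subst s3; simp [get_geoid, get_geoid_alt, pvPARENT, pvFIELDS, pvIsComponent, get_geo_id_uf1, get_geo_id_sf1, get_geo_id_acs2010, PySem.Dict.get?, PySem.Dict.ofList, PySem.Dict.update, PySem.Dict.insert, PySem.Dict.contains, PySem.Dict.items, PySem.Dict.empty, sort040, sort050, sort060, sort140, sort150, List.find?, List.foldl, List.any, Option.getD]
                · simp [get_geoid, get_geoid_alt, pvPARENT, pvFIELDS, pvIsComponent, get_geo_id_uf1, get_geo_id_sf1, get_geo_id_acs2010, PySem.Dict.get?, PySem.Dict.ofList, PySem.Dict.update, PySem.Dict.insert, PySem.Dict.contains, PySem.Dict.items, PySem.Dict.empty, sort040, sort050, sort060, sort140, sort150, List.find?, List.foldl, List.any, Option.getD, show (("2000" == source) = false) from by simp [Ne.symm s1], show (("2010" == source) = false) from by simp [Ne.symm s2], show (("acs2010" == source) = false) from by simp [Ne.symm s3], show ((source == "2000") = false) from by simp [s1], show ((source == "2010") = false) from by simp [s2], show ((source == "acs2010") = false) from by simp [s3]]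
          ·
            simp [get_geoid, get_geoid_alt, pvPARENT, pvFIELDS, pvIsComponent, get_geo_id_uf1, get_geo_id_sf1, get_geo_id_acs2010, PySem.Dict.get?, PySem.Dict.ofList, PySem.Dict.update, PySem.Dict.insert, PySem.Dict.contains, PySem.Dict.items, PySem.Dict.empty, sort040, sort050, sort060, sort140, sort150, List.find?, List.foldl, List.any, Option.getD, show (("040" == sum_lev) = false) from by simp [Ne.symm h040], show (("050" == sum_lev) = false) from by simp [Ne.symm h050], show (("060" == sum_lev) = false) from by simp [Ne.symm h060], show (("140" == sum_lev) = false) from by simp [Ne.symm h140], show (("150" == sum_lev) = false) from by simp [Ne.symm h150], show ((sum_lev == "040") = false) from by simp [h040], show ((sum_lev == "050") = false) from by simp [h050], show ((sum_lev == "060") = false) from by simp [h060], show ((sum_lev == "140") = false) from by simp [h140], show ((sum_lev == "150") = false) from by simp [h150]]
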